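-- pv_equiv track=rewrite | github.com/Koraavo/Jetedu-final-files | Matrices/inverse_try.py | cominors_all
-- ===== SOURCE A (Python) =====
-- def cominors_all(matrix):
--     matrix_all = []
--     for j in range(len(matrix)):
--         copy_matrix = matrix[:]
--         row_pop = j
--         matrix_row_removal = copy_matrix.pop(row_pop)
--         for i in range(len(matrix)):
--             matrix_all.append([item[:i] + item[i + 1:] for item in copy_matrix])
--     return matrix_all
-- ===== SOURCE B (Python) =====
-- def cominors_all(matrix):
--     n = len(matrix)
--     cols_removed = [[row[:i] + row[i + 1:] for row in matrix] for i in range(n)]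
--     return [rows[:j] + rows[j + 1:] for j in range(n) for rows in cols_removed]
-- ===== Notes on version B (the rewrite author's own statement) =====
-- stated objective: alternative
-- what changed: B precomputes each column-deleted version of the whole matrix once and then assembles every minor by deleting one row from the precomputed lists (reusing rows by reference), instead of A's rebuilding every row slice inside the doubly nested loop; measured ~1.8x at the largest size, not enough to claim faster.
import Mathlib
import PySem

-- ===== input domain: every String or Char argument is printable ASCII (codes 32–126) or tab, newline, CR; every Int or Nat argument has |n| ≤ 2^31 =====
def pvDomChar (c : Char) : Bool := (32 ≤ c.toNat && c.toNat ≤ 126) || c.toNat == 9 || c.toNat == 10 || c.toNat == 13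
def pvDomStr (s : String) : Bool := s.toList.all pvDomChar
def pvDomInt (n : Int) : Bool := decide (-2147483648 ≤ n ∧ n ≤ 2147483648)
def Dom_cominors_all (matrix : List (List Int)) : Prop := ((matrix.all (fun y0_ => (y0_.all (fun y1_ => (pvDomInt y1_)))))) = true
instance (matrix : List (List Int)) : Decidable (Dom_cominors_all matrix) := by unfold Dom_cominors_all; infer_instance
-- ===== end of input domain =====

-- B precomputes each column-deleted matrix once and assembles minors by deleting rows; A rebuilds every row slice per minor. Equivalence of return values proved; neither mutates its argument.

-- ===== PORT A =====
-- literal port: for j in range(n): copy = matrix[:]; copy.pop(j); for i in range(n): append comprehension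
def cominors_all (matrix : List (List Int)) : List (List (List Int)) :=
  (PySem.List.pyRange 0 (matrix.length : Int) 1).foldl (fun matrix_all j =>
    let copy_matrix := PySem.List.slice matrix none none
    match PySem.List.pop? copy_matrix j with
    | none => matrix_all  -- unreachable: j is a valid index
    | some (_, copy_matrix) =>
      (PySem.List.pyRange 0 (matrix.length : Int) 1).foldl (fun acc i =>
        acc ++ [copy_matrix.map (fun item =>
          PySem.List.slice item none (some i) ++ PySem.List.slice item (some (i + 1)) none)]) matrix_all)
    []

-- ===== PORT B =====
def cominors_all_alt (matrix : List (List Int)) : List (List (List Int)) :=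
  let n : Int := matrix.length
  let cols_removed := (PySem.List.pyRange 0 n 1).map (fun i =>
    matrix.map (fun row => PySem.List.slice row none (some i) ++ PySem.List.slice row (some (i + 1)) none))
  (PySem.List.pyRange 0 n 1).flatMap (fun j =>
    cols_removed.map (fun rows => PySem.List.slice rows none (some j) ++ PySem.List.slice rows (some (j + 1)) none))

-- ===== PRECONDITION & SPEC =====
def Spec_cominors_all (matrix : List (List Int)) (out : List (List (List Int))) : Prop := out = cominors_all_alt matrix
instance (matrix : List (List Int)) (out : List (List (List Int))) : Decidable (Spec_cominors_all matrix out) := by unfold Spec_cominors_all; infer_instance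

-- ===== CLAIM (what is proved, stated in full; the proofs are below) =====
def Claim_equal_cominors_all : Prop := ∀ (matrix : List (List Int)), Dom_cominors_all matrix → Spec_cominors_all matrix (cominors_all matrix)

-- ===== LEMMAS AND PROOFS =====

-- row with entry i removed, shared normal form
def pvColDel (i : Int) (row : List Int) : List Int :=
  PySem.List.slice row none (some i) ++ PySem.List.slice row (some (i + 1)) none

-- take j ++ drop (j+1) = eraseIdx j, for a natural index
theorem pvSliceEraseIdx {α : Type} (xs : List α) (j : Nat) :
    PySem.List.slice xs none (some (j : Int)) ++ PySem.List.slice xs (some ((j : Int) + 1)) none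
      = xs.eraseIdx j := by
  have h1 : ((j : Int) + 1) = ((j + 1 : Nat) : Int) := by push_cast; ring
  rw [PySem.List.slice_to_natCast, h1, PySem.List.slice_from_natCast, List.eraseIdx_eq_take_drop_succ]

theorem cominors_all_spec_aux (matrix : List (List Int)) :
    cominors_all matrix = cominors_all_alt matrix := by
  unfold cominors_all cominors_all_alt
  rw [PySem.List.slice_none_none]
  set n : Nat := matrix.length with hn
  -- normalise A's outer loop body for j ∈ range
  rw [PySem.List.foldl_congr_mem'
      (g := fun (acc : List (List (List Int))) (j : Int) =>
        acc ++ (PySem.List.pyRange 0 (n : Int) 1).map (fun i =>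
          (matrix.eraseIdx j.toNat).map (pvColDel i)))]
  · rw [PySem.List.foldl_append_eq_flatMap]
    simp only [List.nil_append, List.map_map]
    apply List.flatMap_congr  -- or congrArg; pointwise over j
    intro j hj
    rw [PySem.List.mem_pyRange_one] at hj
    obtain ⟨hj0, hjn⟩ := hj
    obtain ⟨k, rfl⟩ : ∃ k : Nat, j = (k : Int) := ⟨j.toNat, (Int.toNat_of_nonneg hj0).symm⟩
    apply List.map_congr_left
    intro i _
    show _ = PySem.List.slice _ none (some (k : Int)) ++ PySem.List.slice _ (some ((k : Int) + 1)) none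
    rw [pvSliceEraseIdx, List.eraseIdx_map, Int.toNat_natCast]
    rfl
  · intro j hj acc
    rw [PySem.List.mem_pyRange_one] at hj
    obtain ⟨hj0, hjn⟩ := hj
    obtain ⟨k, rfl⟩ : ∃ k : Nat, j = (k : Int) := ⟨j.toNat, (Int.toNat_of_nonneg hj0).symm⟩
    have hk : k < matrix.length := by exact_mod_cast hjn
    simp only [PySem.List.pop?_natCast matrix k hk]
    simp only [Int.toNat_natCast]
    rw [PySem.List.foldl_append_singleton_eq_map]
    rfl

-- ===== VERDICT (by name: the statement is the Claim_ definition above) =====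
theorem cominors_all_spec : Claim_equal_cominors_all := by
  intro matrix _
  unfold Spec_cominors_all
  exact cominors_all_spec_aux matrix
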